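-- pv_equiv track=rewrite | github.com/KedraMichal/robocode | Python-Robocode/Robots/Robobobo.py | buckets_angle
-- ===== SOURCE A (Python) =====
-- def buckets_angle(angel):
--     bucket_number = 0
--     for angle_value in range(60, 360, 60):
--         if angel < angle_value:
--             return bucket_number
--         else:
--             bucket_number += 1
--     return bucket_number
-- ===== SOURCE B (Python) =====
-- def buckets_angle(angel):
--     return max(0, min(angel // 60, 5))
-- ===== Notes on version B (the rewrite author's own statement) =====
-- stated objective: simpler
-- what changed: Replaced the threshold-counting loop over the bucket boundaries with a closed-form clamped floor division.
import Mathlib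
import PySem

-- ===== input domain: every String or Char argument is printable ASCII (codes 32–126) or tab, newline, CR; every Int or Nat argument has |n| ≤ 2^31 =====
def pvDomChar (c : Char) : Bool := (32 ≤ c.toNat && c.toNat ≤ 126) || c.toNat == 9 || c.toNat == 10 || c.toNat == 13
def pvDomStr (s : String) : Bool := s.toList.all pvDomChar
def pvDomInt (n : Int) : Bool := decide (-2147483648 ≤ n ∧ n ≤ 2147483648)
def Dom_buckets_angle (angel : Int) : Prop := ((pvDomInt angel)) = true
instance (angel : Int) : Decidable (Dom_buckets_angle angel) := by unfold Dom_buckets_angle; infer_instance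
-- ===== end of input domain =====

-- B is simpler: the threshold-counting loop is replaced by the closed form a clamped floor-division closed form.

-- ===== PORT A =====
-- the for-loop with early return: recurse over the range list carrying bucket_number
def bucketsLoop (angel : Int) : List Int → Int → Int
  | [], b => b
  | v :: rest, b => if angel < v then b else bucketsLoop angel rest (b + 1)

def buckets_angle (angel : Int) : Int :=
  bucketsLoop angel (PySem.List.pyRange 60 360 60) 0

-- ===== PORT B =====
def buckets_angle_alt (angel : Int) : Int :=
  max 0 (min (PySem.Int.floordiv angel 60) 5)

-- ===== PRECONDITION & SPEC =====
def Spec_buckets_angle (angel : Int) (out : Int) : Prop := out = buckets_angle_alt angel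
instance (angel : Int) (out : Int) : Decidable (Spec_buckets_angle angel out) := by unfold Spec_buckets_angle; infer_instance

-- ===== CLAIM (what is proved, stated in full; the proofs are below) =====
def Claim_equal_buckets_angle : Prop := ∀ (angel : Int), Dom_buckets_angle angel → Spec_buckets_angle angel (buckets_angle angel)

-- ===== LEMMAS AND PROOFS =====
theorem pyRange_60_360_60 : PySem.List.pyRange 60 360 60 = [60, 120, 180, 240, 300] := by decide

-- ===== VERDICT (by name: the statement is the Claim_ definition above) =====
theorem buckets_angle_spec : Claim_equal_buckets_angle := by
  intro angel _
  unfold Spec_buckets_angle buckets_angle buckets_angle_alt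
  rw [pyRange_60_360_60, PySem.Int.floordiv_eq_ediv_of_pos (by omega)]
  simp only [bucketsLoop]
  split_ifs <;> omega
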